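-- pv_equiv track=rewrite | github.com/andresparradev/training-camp-argentina | day5/B.py | solve
-- ===== SOURCE A (Python) =====
-- def solve(n, exercises):
--     biceps=0
--     back=0
--     chest=0
--
--     i = 1
--     for exercise in exercises:
--         if i == 1:
--             chest += exercise
--         elif i == 2:
--             biceps += exercise
--         elif i == 3:
--             back += exercise
--
--         if i == 3:
--             i = 1
--         else:
--             i+=1
--
--     if biceps > back and biceps > chest:
--         return 'biceps'
--     elif back > biceps and back > chest:
--         return 'back'
--     else:
--         return 'chest'
-- ===== SOURCE B (Python) =====
-- def solve(n, exercises):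
--     chest = sum(exercises[0::3])
--     biceps = sum(exercises[1::3])
--     back = sum(exercises[2::3])
--
--     if biceps > back and biceps > chest:
--         return 'biceps'
--     elif back > biceps and back > chest:
--         return 'back'
--     else:
--         return 'chest'
-- ===== Notes on version B (the rewrite author's own statement) =====
-- stated objective: simpler
-- what changed: Replaces the stateful single pass with a cycling 1..3 counter and per-element if/elif dispatch by three direct strided slice-sums sum(exercises[i::3]); the final strict-greater comparison is kept verbatim.
import Mathlib
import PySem

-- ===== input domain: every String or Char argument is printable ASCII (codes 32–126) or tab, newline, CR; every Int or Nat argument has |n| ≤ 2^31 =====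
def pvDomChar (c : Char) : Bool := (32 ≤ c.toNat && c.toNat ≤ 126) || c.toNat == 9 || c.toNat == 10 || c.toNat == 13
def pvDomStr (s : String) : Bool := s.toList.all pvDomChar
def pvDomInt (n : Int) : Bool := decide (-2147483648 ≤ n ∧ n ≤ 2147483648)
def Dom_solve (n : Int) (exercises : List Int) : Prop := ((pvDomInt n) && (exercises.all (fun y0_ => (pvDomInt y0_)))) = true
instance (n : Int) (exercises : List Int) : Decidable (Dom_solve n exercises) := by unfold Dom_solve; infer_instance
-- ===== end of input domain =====

-- B replaces A's mod-3 counter loop with three strided slice-sums; objective: simpler.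

-- ===== PORT A =====
-- the for-loop over exercises with state (biceps, back, chest, i), branches in source order
def solveLoop (l : List Int) (i biceps back chest : Int) : Int × Int × Int :=
  match l with
  | [] => (biceps, back, chest)
  | exercise :: rest =>
    let chest' := if i = 1 then chest + exercise else chest
    let biceps' := if i ≠ 1 ∧ i = 2 then biceps + exercise else biceps
    let back' := if i ≠ 1 ∧ i ≠ 2 ∧ i = 3 then back + exercise else back
    let i' := if i = 3 then 1 else i + 1
    solveLoop rest i' biceps' back' chest'

def solve (n : Int) (exercises : List Int) : String :=
  let (biceps, back, chest) := solveLoop exercises 1 0 0 0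
  if biceps > back ∧ biceps > chest then "biceps"
  else if back > biceps ∧ back > chest then "back"
  else "chest"

-- ===== PORT B =====
-- exact hand port of sum(xs[::3]): sum of every third element (PySem has no stepped slice)
def strideSum3 : List Int → Int
  | [] => 0
  | x :: t => x + strideSum3 (t.drop 2)
termination_by l => l.length
decreasing_by simp [List.length_drop]

def solve_alt (n : Int) (exercises : List Int) : String :=
  let chest := strideSum3 (exercises.drop 0)      -- sum(exercises[0::3])
  let biceps := strideSum3 (exercises.drop 1)     -- sum(exercises[1::3])
  let back := strideSum3 (exercises.drop 2)       -- sum(exercises[2::3])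
  if biceps > back ∧ biceps > chest then "biceps"
  else if back > biceps ∧ back > chest then "back"
  else "chest"

-- ===== PRECONDITION & SPEC =====
def Spec_solve (n : Int) (exercises : List Int) (out : String) : Prop := out = solve_alt n exercises
instance (n : Int) (exercises : List Int) (out : String) : Decidable (Spec_solve n exercises out) := by unfold Spec_solve; infer_instance

-- ===== CLAIM (what is proved, stated in full; the proofs are below) =====
def Claim_equal_solve : Prop := ∀ (n : Int) (exercises : List Int), Dom_solve n exercises → Spec_solve n exercises (solve n exercises)

-- ===== LEMMAS AND PROOFS =====
theorem strideSum3_nil : strideSum3 [] = 0 := by rw [strideSum3]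

theorem strideSum3_cons (x : Int) (t : List Int) :
    strideSum3 (x :: t) = x + strideSum3 t.tail.tail := by
  rw [strideSum3]
  cases t with
  | nil => rfl
  | cons y u => cases u <;> rfl

-- A's loop started at phase 1/2/3 computes the three stride sums, rotated accordingly.
theorem solveLoop_strides (l : List Int) : ∀ b k c : Int,
    solveLoop l 1 b k c = (b + strideSum3 l.tail, k + strideSum3 l.tail.tail, c + strideSum3 l)
    ∧ solveLoop l 2 b k c = (b + strideSum3 l, k + strideSum3 l.tail, c + strideSum3 l.tail.tail)
    ∧ solveLoop l 3 b k c = (b + strideSum3 l.tail.tail, k + strideSum3 l, c + strideSum3 l.tail) := by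
  induction l with
  | nil => intro b k c; simp [solveLoop, strideSum3_nil]
  | cons x t ih =>
    intro b k c
    refine ⟨?_, ?_, ?_⟩ <;>
      simp only [solveLoop, strideSum3_cons, List.tail_cons] <;>
      norm_num <;>
      first
        | exact (ih b k (c + x)).2.1.trans (by ring_nf)
        | exact (ih (b + x) k c).2.2.trans (by ring_nf)
        | exact (ih b (k + x) c).1.trans (by ring_nf)

-- ===== VERDICT (by name: the statement is the Claim_ definition above) =====
theorem solve_spec : Claim_equal_solve := by
  intro n exercises _
  unfold Spec_solve solve solve_alt
  rw [(solveLoop_strides exercises 0 0 0).1]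
  simp only [List.drop_zero, List.drop_one, zero_add]
  rw [show exercises.drop 2 = exercises.tail.tail by cases exercises <;> simp [List.drop]]
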